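-- pv_equiv track=rewrite | github.com/paiml/depyler | examples/hard_numeric_polynomial.py | poly_degree
-- ===== SOURCE A (Python) =====
-- def poly_degree(coeffs: list[int]) -> int:
--     """Return degree of polynomial (ascending powers)."""
--     n: int = len(coeffs)
--     i: int = n - 1
--     while i >= 0:
--         if coeffs[i] != 0:
--             return i
--         i = i - 1
--     return 0
-- ===== SOURCE B (Python) =====
-- def poly_degree(coeffs: list[int]) -> int:
--     """Return degree of polynomial (ascending powers)."""
--     return max((i for i, c in enumerate(coeffs) if c != 0), default=0)
-- ===== Notes on version B (the rewrite author's own statement) =====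
-- stated objective: idiomatic
-- what changed: Replaces the descending while-loop with early return by a single ascending enumerate pass accumulating the maximum nonzero index (max with default=0).
import Mathlib
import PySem

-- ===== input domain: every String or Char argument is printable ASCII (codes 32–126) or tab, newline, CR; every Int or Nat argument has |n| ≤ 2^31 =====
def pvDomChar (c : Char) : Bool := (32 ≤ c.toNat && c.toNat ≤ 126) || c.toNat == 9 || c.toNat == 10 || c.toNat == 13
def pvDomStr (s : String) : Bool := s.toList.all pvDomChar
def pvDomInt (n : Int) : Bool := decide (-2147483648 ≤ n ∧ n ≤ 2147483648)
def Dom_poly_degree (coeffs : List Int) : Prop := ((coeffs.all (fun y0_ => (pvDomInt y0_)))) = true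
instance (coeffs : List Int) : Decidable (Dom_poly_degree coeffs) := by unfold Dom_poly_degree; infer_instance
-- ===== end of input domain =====

-- B replaces A's descending early-return scan by an ascending enumerate pass keeping the max nonzero index (idiomatic; same cost).

-- ===== PORT A =====
-- the while-loop 'while i >= 0: …; i = i - 1'; coeffs[i] is always in range here
-- (0 ≤ i ≤ len-1), so pyGet? … |>.getD 0 is exact (the none branch is unreachable)
def polyDegreeLoopA (coeffs : List Int) (i : Int) : Int :=
  if h : 0 ≤ i then
    if (PySem.List.pyGet? coeffs i).getD 0 ≠ 0 then i
    else polyDegreeLoopA coeffs (i - 1)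
  else 0
termination_by (i+1).toNat
decreasing_by simp_wf; omega

def poly_degree (coeffs : List Int) : Int :=
  polyDegreeLoopA coeffs ((coeffs.length : Int) - 1)

-- ===== PORT B =====
def poly_degree_alt (coeffs : List Int) : Int :=
  (PySem.List.enumerate coeffs).foldl
    (fun deg ic => if ic.2 ≠ 0 then max deg ic.1 else deg) 0

-- ===== PRECONDITION & SPEC =====
def Spec_poly_degree (coeffs : List Int) (out : Int) : Prop := out = poly_degree_alt coeffs
instance (coeffs : List Int) (out : Int) : Decidable (Spec_poly_degree coeffs out) := by unfold Spec_poly_degree; infer_instance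

-- ===== CLAIM (what is proved, stated in full; the proofs are below) =====
def Claim_equal_poly_degree : Prop := ∀ (coeffs : List Int), Dom_poly_degree coeffs → Spec_poly_degree coeffs (poly_degree coeffs)

-- ===== LEMMAS AND PROOFS =====

theorem enumerate_append_singleton (xs : List Int) (c : Int) : ∀ (s : Int),
    PySem.List.enumerate (xs ++ [c]) s
      = PySem.List.enumerate xs s ++ [((s + xs.length : Int), c)] := by
  induction xs with
  | nil => intro s; simp [PySem.List.enumerate_cons, PySem.List.enumerate_nil]
  | cons x xs ih =>
    intro s
    simp only [List.cons_append, PySem.List.enumerate_cons, ih (s + 1), List.length_cons]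
    have e : s + ((xs.length : Int) + 1) = s + 1 + (xs.length : Int) := by ring
    push_cast
    rw [e]

theorem altLoop_le (xs : List Int) : ∀ (s d : Int), d ≤ max d (s + xs.length) →
    (PySem.List.enumerate xs s).foldl
      (fun deg ic => if ic.2 ≠ 0 then max deg ic.1 else deg) d
      ≤ max d (s + xs.length) := by
  induction xs with
  | nil => intro s d _; simp [PySem.List.enumerate_nil]
  | cons x xs ih =>
    intro s d _
    simp only [PySem.List.enumerate_cons, List.foldl_cons, List.length_cons]
    have h1 : (if x ≠ 0 then max d s else d) ≤ max d (s + (xs.length + 1)) := by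
      split <;> [skip; exact le_max_left _ _]
      · have : s ≤ s + (xs.length + 1) := by omega
        exact max_le_max le_rfl this |>.trans_eq' (by simp)
    have := ih (s + 1) (if x ≠ 0 then max d s else d) (le_max_left _ _)
    calc (PySem.List.enumerate xs (s+1)).foldl
          (fun deg ic => if ic.2 ≠ 0 then max deg ic.1 else deg)
          (if x ≠ 0 then max d s else d)
        ≤ max (if x ≠ 0 then max d s else d) (s + 1 + xs.length) := this
      _ ≤ max d (s + (xs.length + 1)) := by
          apply max_le
          · exact h1
          · apply le_max_of_le_right; omega

theorem alt_le_length (xs : List Int) : poly_degree_alt xs ≤ (xs.length : Int) := by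
  have := altLoop_le xs 0 0 (le_max_left _ _)
  have h0 : max (0:Int) ((0:Int) + xs.length) = (xs.length : Int) := by
    simp
  simpa [poly_degree_alt, PySem.List.enumerate, h0] using this

theorem alt_snoc (xs : List Int) (c : Int) :
    poly_degree_alt (xs ++ [c])
      = if c ≠ 0 then max (poly_degree_alt xs) (xs.length : Int) else poly_degree_alt xs := by
  unfold poly_degree_alt
  rw [show PySem.List.enumerate (xs ++ [c]) = PySem.List.enumerate (xs ++ [c]) 0 from rfl,
      enumerate_append_singleton xs c 0]
  simp [List.foldl_append]

theorem loopA_neg (coeffs : List Int) (i : Int) (h : i < 0) :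
    polyDegreeLoopA coeffs i = 0 := by
  rw [polyDegreeLoopA]
  have : ¬ (0:Int) ≤ i := by omega
  simp [this]

theorem loopA_snoc_lt (xs : List Int) (c : Int) : ∀ (i : Int), i < (xs.length : Int) →
    polyDegreeLoopA (xs ++ [c]) i = polyDegreeLoopA xs i := by
  intro i
  induction i using Int.induction_on with
  | zero =>
    intro h
    conv_lhs => rw [polyDegreeLoopA]
    conv_rhs => rw [polyDegreeLoopA]
    have hg : PySem.List.pyGet? (xs ++ [c]) 0 = PySem.List.pyGet? xs 0 := by
      cases xs with
      | nil => simp at h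
      | cons y ys => simp [PySem.List.pyGet?_zero_cons]
    rw [hg]
    split_ifs with h1 h2
    · rfl
    · rw [loopA_neg _ _ (by omega), loopA_neg _ _ (by omega)]
    · rfl
  | succ k ihk =>
    intro h
    conv_lhs => rw [polyDegreeLoopA]
    conv_rhs => rw [polyDegreeLoopA]
    have hnn : (0:Int) ≤ (k:Int) + 1 := by positivity
    have hlt : ((k:Int) + 1).toNat < xs.length := by omega
    have hg : PySem.List.pyGet? (xs ++ [c]) ((k:Int)+1) = PySem.List.pyGet? xs ((k:Int)+1) := by
      rw [PySem.List.pyGet?_of_nonneg _ hnn, PySem.List.pyGet?_of_nonneg _ hnn,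
          List.getElem?_append_left hlt]
    rw [hg]
    have e : (k:Int) + 1 - 1 = (k:Int) := by ring
    rw [e]
    split_ifs with h1
    · rfl
    · exact ihk (by omega)
  | pred k _ =>
    intro _
    rw [loopA_neg _ _ (by omega), loopA_neg _ _ (by omega)]

theorem a_snoc (xs : List Int) (c : Int) :
    poly_degree (xs ++ [c])
      = if c ≠ 0 then (xs.length : Int) else poly_degree xs := by
  unfold poly_degree
  have hlen : ((xs ++ [c]).length : Int) - 1 = (xs.length : Int) := by simp
  rw [hlen]
  conv_lhs => rw [polyDegreeLoopA]
  have hget : PySem.List.pyGet? (xs ++ [c]) (xs.length : Int) = some c := by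
    exact PySem.List.pyGet?_append_length (pre := xs) (ys := []) (y := c)
  rw [hget]
  simp only [Int.natCast_nonneg, dite_eq_ite, if_true, Option.getD_some]
  split_ifs with h1
  · rfl
  · exact loopA_snoc_lt xs c ((xs.length : Int) - 1) (by omega)

theorem a_eq_alt (coeffs : List Int) : poly_degree coeffs = poly_degree_alt coeffs := by
  induction coeffs using List.reverseRecOn with
  | nil =>
    unfold poly_degree poly_degree_alt
    rw [polyDegreeLoopA]
    norm_num [PySem.List.enumerate_nil]
  | append_singleton xs c ih =>
    rw [a_snoc, alt_snoc, ih]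
    split
    · exact (max_eq_right (alt_le_length xs)).symm
    · rfl

-- ===== VERDICT (by name: the statement is the Claim_ definition above) =====
theorem poly_degree_spec : Claim_equal_poly_degree := by
  intro coeffs _
  unfold Spec_poly_degree
  exact a_eq_alt coeffs
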